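-- pv_equiv track=rewrite | github.com/Always-prog/Console-game | console/lib/lib.py | GetSizeObject
-- ===== SOURCE A (Python) =====
-- def GetSizeObject(img: str):
--     w = 0
--     weights = []
--     h = [word for word in img if word == "\n"]
--
--     for word in img:
--         if word == "\n":
--             weights.append(w)
--             w = 0
--         else:
--             w += 1
--     try:
--         return {"w": max(weights), "h":len(h)}
--     except ValueError:
--         return {"w": 0, "h":0}
-- ===== SOURCE B (Python) =====
-- def GetSizeObject(img: str):
--     lines = img.split("\n")
--     h = len(lines) - 1
--     if h == 0:
--         return {"w": 0, "h": 0}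
--     return {"w": max(len(l) for l in lines[:h]), "h": h}
-- ===== Notes on version B (the rewrite author's own statement) =====
-- stated objective: simpler
-- what changed: Replaces the char-by-char accumulator loop (plus a separate newline comprehension) by a single str.split on the newline separator: h is len(lines)-1 and w is the max length over all lines but the trailing segment, which A never appends.
import Mathlib
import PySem

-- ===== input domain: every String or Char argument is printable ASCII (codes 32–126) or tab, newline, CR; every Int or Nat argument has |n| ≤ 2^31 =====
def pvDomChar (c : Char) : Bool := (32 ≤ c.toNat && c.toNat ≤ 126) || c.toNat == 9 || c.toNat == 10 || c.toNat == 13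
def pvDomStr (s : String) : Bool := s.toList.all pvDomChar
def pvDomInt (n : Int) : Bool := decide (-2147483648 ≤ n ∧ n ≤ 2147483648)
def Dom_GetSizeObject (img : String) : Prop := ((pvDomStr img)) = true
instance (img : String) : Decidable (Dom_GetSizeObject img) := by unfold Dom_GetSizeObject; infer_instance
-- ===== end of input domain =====

-- B replaces A's char-by-char accumulator loop by one split("\n"): same return value, stated simpler.

-- ===== PORT A =====
def GetSizeObject (img : String) : List (String × Int) :=
  let cs := img.toList
  let h := cs.filter (fun c => c == '\n')
  let st := cs.foldl
    (fun (p : Int × List Int) c =>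
      if c == '\n' then (0, p.2 ++ [p.1]) else (p.1 + 1, p.2))
    (0, [])
  -- try: max(weights) raises ValueError exactly when weights is empty (max? = none)
  match PySem.List.max? st.2 id with
  | some m => [("w", m), ("h", (h.length : Int))]
  | none => [("w", 0), ("h", 0)]

-- ===== PORT B =====
def GetSizeObject_alt (img : String) : List (String × Int) :=
  let lines := (PySem.Str.split? img "\n").getD []   -- sep "\n" ≠ "", so split? is always some
  let h : Int := (lines.length : Int) - 1
  if h = 0 then [("w", 0), ("h", 0)]
  else
    -- max over a nonempty generator (h ≠ 0 ⇒ lines[:h] nonempty); getD 0 is never used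
    [("w", (PySem.List.max? ((PySem.List.slice lines none (some h)).map PySem.Str.len) id).getD 0),
     ("h", h)]

-- ===== PRECONDITION & SPEC =====
def Spec_GetSizeObject (img : String) (out : List (String × Int)) : Prop := out = GetSizeObject_alt img
instance (img : String) (out : List (String × Int)) : Decidable (Spec_GetSizeObject img out) := by unfold Spec_GetSizeObject; infer_instance

-- ===== CLAIM (what is proved, stated in full; the proofs are below) =====
def Claim_equal_GetSizeObject : Prop := ∀ (img : String), Dom_GetSizeObject img → Spec_GetSizeObject img (GetSizeObject img)

-- ===== LEMMAS AND PROOFS =====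

-- structural split on '\n' (proof-side reference shape; neither port uses it)
def splitNl : List Char → List (List Char)
  | [] => [[]]
  | c :: rest =>
    if c = '\n' then [] :: splitNl rest
    else
      match splitNl rest with
      | [] => [[c]]
      | s :: ss => (c :: s) :: ss

theorem splitNl_ne_nil (cs : List Char) : splitNl cs ≠ [] := by
  induction cs with
  | nil => simp [splitNl]
  | cons c rest ih =>
    simp only [splitNl]
    split_ifs with h
    · simp
    · cases hs : splitNl rest <;> simp

-- prepend a chunk onto the head segment
def pvPrepend (p : List Char) : List (List Char) → List (List Char)
  | [] => [p]
  | s :: ss => (p ++ s) :: ss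

theorem pvPrepend_nil (ls : List (List Char)) (h : ls ≠ []) : pvPrepend [] ls = ls := by
  cases ls with
  | nil => exact absurd rfl h
  | cons s ss => simp [pvPrepend]

theorem go_nl (fuel : Nat) :
    ∀ (l cur : List Char) (acc : List (List Char)), l.length < fuel →
      PySem.Chars.splitOn.go ['\n'] fuel l cur acc
        = acc.reverse ++ pvPrepend cur.reverse (splitNl l) := by
  induction fuel with
  | zero => intro l cur acc h; omega
  | succ fuel ih =>
    intro l cur acc h
    cases l with
    | nil => simp [PySem.Chars.splitOn.go, splitNl, pvPrepend]
    | cons c rest =>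
      by_cases hc : c = '\n'
      · subst hc
        rw [show PySem.Chars.splitOn.go ['\n'] (fuel+1) ('\n' :: rest) cur acc
              = PySem.Chars.splitOn.go ['\n'] fuel rest [] (cur.reverse :: acc) by
            simp [PySem.Chars.splitOn.go, List.isPrefixOf]]
        rw [ih rest [] (cur.reverse :: acc) (by simpa using Nat.lt_of_succ_lt_succ h)]
        rw [show ([] : List Char).reverse = [] from rfl,
            pvPrepend_nil _ (splitNl_ne_nil rest)]
        simp [splitNl, pvPrepend]
      · rw [show PySem.Chars.splitOn.go ['\n'] (fuel+1) (c :: rest) cur acc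
              = PySem.Chars.splitOn.go ['\n'] fuel rest (c :: cur) acc by
            simp [PySem.Chars.splitOn.go, List.isPrefixOf, Ne.symm hc]]
        rw [ih rest (c :: cur) acc (by simpa using Nat.lt_of_succ_lt_succ h)]
        simp only [splitNl, if_neg hc]
        cases hs : splitNl rest with
        | nil => exact absurd hs (splitNl_ne_nil rest)
        | cons s ss => simp [pvPrepend]

theorem splitOn_nl (cs : List Char) :
    PySem.Chars.splitOn cs ['\n'] = splitNl cs := by
  have := go_nl (cs.length + 1) cs [] [] (by omega)
  simpa [PySem.Chars.splitOn, pvPrepend_nil _ (splitNl_ne_nil cs)] using this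

-- A's loop state characterised by splitNl: (final width, appended weights)
def pvWidths (w : Int) : List (List Char) → Int × List Int
  | [] => (w, [])
  | [s] => (w + s.length, [])
  | s :: ss => ((pvWidths 0 ss).1, (w + s.length) :: (pvWidths 0 ss).2)

theorem pvWidths_shift (w : Int) (c : Char) (s : List Char) (ss : List (List Char)) :
    pvWidths w ((c :: s) :: ss) = pvWidths (w + 1) (s :: ss) := by
  cases ss with
  | nil => simp [pvWidths]; ring
  | cons t ts =>
    simp only [pvWidths, List.length_cons, Prod.mk.injEq]
    refine ⟨trivial, ?_⟩
    congr 1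
    push_cast
    ring

theorem loopA (cs : List Char) :
    ∀ (w : Int) (acc : List Int),
      cs.foldl
        (fun (p : Int × List Int) c =>
          if c == '\n' then (0, p.2 ++ [p.1]) else (p.1 + 1, p.2))
        (w, acc)
        = ((pvWidths w (splitNl cs)).1, acc ++ (pvWidths w (splitNl cs)).2) := by
  induction cs with
  | nil => intro w acc; simp [splitNl, pvWidths]
  | cons c rest ih =>
    intro w acc
    by_cases hc : c = '\n'
    · subst hc
      simp only [List.foldl_cons]
      rw [if_pos (by simp)]
      rw [ih 0 (acc ++ [w])]
      have hne := splitNl_ne_nil rest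
      cases hs : splitNl rest with
      | nil => exact absurd hs hne
      | cons s ss => simp [splitNl, hs, pvWidths]
    · simp only [List.foldl_cons]
      rw [if_neg (by simp [hc])]
      rw [ih (w + 1) acc]
      have hne := splitNl_ne_nil rest
      cases hs : splitNl rest with
      | nil => exact absurd hs hne
      | cons s ss => simp [splitNl, if_neg hc, hs, pvWidths_shift]

theorem pvWidths_zero_snd (ls : List (List Char)) (h : ls ≠ []) :
    (pvWidths 0 ls).2 = ls.dropLast.map (fun s => (s.length : Int)) := by
  induction ls with
  | nil => exact absurd rfl h
  | cons s ss ih =>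
    cases ss with
    | nil => simp [pvWidths]
    | cons t ts =>
      simp only [pvWidths, List.dropLast_cons₂, List.map_cons]
      rw [ih (by simp)]
      simp

theorem splitNl_length (cs : List Char) :
    (splitNl cs).length = (cs.filter (fun c => c == '\n')).length + 1 := by
  induction cs with
  | nil => simp [splitNl]
  | cons c rest ih =>
    by_cases hc : c = '\n'
    · subst hc; simp [splitNl, ih]
    · have hne := splitNl_ne_nil rest
      cases hs : splitNl rest with
      | nil => exact absurd hs hne
      | cons s ss =>
        simp only [splitNl, if_neg hc, hs]
        simp only [List.filter_cons]
        rw [if_neg (by simpa using hc)]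
        simpa [hs] using ih

theorem split?_getD (img : String) :
    ((PySem.Str.split? img "\n").getD []) = (splitNl img.toList).map String.ofList := by
  have : ("\n" : String).toList = ['\n'] := by decide
  simp [PySem.Str.split?, PySem.Chars.split?, this, List.isEmpty, splitOn_nl]

theorem pvFoldMax_isSome (f : Option Int → Int → Option Int)
    (hf : ∀ (m x : Int), f (some m) x = some x ∨ f (some m) x = some m) (as : List Int) :
    ∀ (m : Int), (List.foldl f (some m) as).isSome = true := by
  induction as with
  | nil => intro m; rfl
  | cons b bs ih =>
    intro m
    simp only [List.foldl_cons]
    rcases hf m b with h | h <;> rw [h] <;> [exact ih b; exact ih m]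

theorem pvMax?_cons_isSome (a : Int) (as : List Int) :
    (PySem.List.max? (a :: as) id).isSome = true := by
  simp only [PySem.List.max?, List.foldl_cons]
  exact pvFoldMax_isSome _
    (fun m x => by dsimp only; split_ifs <;> [left; right] <;> rfl) as a

-- ===== VERDICT (by name: the statement is the Claim_ definition above) =====
theorem GetSizeObject_spec : Claim_equal_GetSizeObject := by
  intro img _
  unfold Spec_GetSizeObject
  simp only [GetSizeObject, GetSizeObject_alt]
  rw [split?_getD]
  rw [loopA img.toList 0 []]
  have hlen := splitNl_length img.toList
  have hne := splitNl_ne_nil img.toList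
  generalize hls : splitNl img.toList = ls at hlen hne ⊢
  have hw2 : (pvWidths 0 ls).2 = ls.dropLast.map (fun s => (s.length : Int)) :=
    pvWidths_zero_snd ls hne
  have hmaplen : (ls.map String.ofList).length = ls.length := by simp
  simp only [List.nil_append, hw2, hmaplen]
  by_cases h0 : ((ls.length : Int) - 1) = 0
  · -- one segment: weights empty (max raises), B's branch h = 0
    have hlen1 : ls.length = 1 := by omega
    have hdl : ls.dropLast = [] := by
      rw [List.dropLast_eq_take, hlen1]
      simp
    rw [hdl]
    simp [PySem.List.max?, if_pos h0]
  · -- ≥ 2 segments: weights nonempty, both sides take the max over the same list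
    rw [if_neg h0]
    have hge : 1 ≤ ls.length := List.length_pos_of_ne_nil hne
    have key : List.map PySem.Str.len
          (PySem.List.slice (List.map String.ofList ls) none (some ((ls.length : Int) - 1)))
        = ls.dropLast.map (fun s => (s.length : Int)) := by
      rw [PySem.List.slice_to _ (by omega)]
      have ht : ((ls.length : Int) - 1).toNat = ls.length - 1 := by omega
      rw [ht, ← List.map_take, ← List.dropLast_eq_take, List.map_map]
      exact congrArg (List.map · ls.dropLast)
        (funext (fun cs => by simp [PySem.Str.len]))
    rw [key]
    have hdlne : ls.dropLast.map (fun s => (s.length : Int)) ≠ [] := by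
      simp only [ne_eq, List.map_eq_nil_iff]
      intro hdl
      have := congrArg List.length hdl
      simp [List.length_dropLast] at this
      omega
    cases hmax : PySem.List.max? (ls.dropLast.map (fun s => (s.length : Int))) id with
    | none =>
      exfalso
      cases hmm : ls.dropLast.map (fun s => (s.length : Int)) with
      | nil => exact hdlne hmm
      | cons a as =>
        rw [hmm] at hmax
        have := pvMax?_cons_isSome a as
        rw [hmax] at this
        simp at this
    | some m =>
      simp only [Option.getD_some]
      refine congrArg₂ (fun (x : Int) (y : Int) => [("w", x), ("h", y)]) rfl ?_
      omega
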